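-- pv_equiv track=rewrite | github.com/AnetaStoycheva/Programming0_HackBulgaria | Week 5/status.py | status_count
-- ===== SOURCE A (Python) =====
-- def status_count(students):
--
--     result = {
--         'finalized': [],
--         'not_finalized': []
--         }
--
--     for a in students:
--
--         if a['status'] == 'finalized':  # dali st-ta na klu4 'status' e 'finalized'
--             result['finalized'] += [a['name']]
--
-- # result['finalized'].append(a['name']) - 2ri na4in za dobavqne na str kym spisyka result['finalized']
--         elif a['status'] == 'not_finalized':
--             result['not_finalized'] += [a['name']]
--
--     return result
-- ===== SOURCE B (Python) =====
-- def status_count(students):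
--     # Recursive back-to-front construction: build the result for the tail
--     # first, then PREPEND the head's name to the matching bucket.
--     def go(i):
--         if i == len(students):
--             return {'finalized': [], 'not_finalized': []}
--         rest = go(i + 1)
--         a = students[i]
--         s = a['status']
--         if s in rest:
--             rest[s] = [a['name']] + rest[s]
--         return rest
--     return go(0)
-- ===== Notes on version B (the rewrite author's own statement) =====
-- stated objective: alternative
-- what changed: Replaces A's forward single-pass loop that appends names to a mutated result dict with a recursion over the list that builds the result back-to-front, prepending each head's name to the matching bucket of the recursively built tail result, dispatching by dict-key membership instead of an if/elif chain.
-- outside the precondition, e.g. on status_count([{'name': 'x'}]): A raises KeyError, B raises KeyError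
import Mathlib
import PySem

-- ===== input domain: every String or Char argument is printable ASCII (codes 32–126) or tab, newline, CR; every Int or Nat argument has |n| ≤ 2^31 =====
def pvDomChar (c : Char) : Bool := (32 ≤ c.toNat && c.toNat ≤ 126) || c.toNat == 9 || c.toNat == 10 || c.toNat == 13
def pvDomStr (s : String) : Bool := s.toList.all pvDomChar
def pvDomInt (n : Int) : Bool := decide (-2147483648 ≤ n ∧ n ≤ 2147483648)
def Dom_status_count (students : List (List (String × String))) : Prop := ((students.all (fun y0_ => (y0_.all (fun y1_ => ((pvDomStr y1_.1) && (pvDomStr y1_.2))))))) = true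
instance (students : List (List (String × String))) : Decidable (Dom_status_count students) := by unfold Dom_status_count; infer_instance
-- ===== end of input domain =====

-- B replaces A's forward appending loop with a recursion that builds the result back-to-front by prepending (alternative decomposition; same cost).

-- ===== PORT A =====
-- a['k'] : first-match association-list lookup; exact for Python dicts under the type convention.
-- `.getD ""` is reached only outside Pre_status_count (where Python raises KeyError).
def pyItem (a : List (String × String)) (k : String) : String := (a.lookup k).getD ""

-- single forward pass: the result dict's two lists carried as state, names APPENDED by the if/elif chain
def status_count (students : List (List (String × String))) : List (String × List String) :=
  let r := students.foldl
    (fun (res : List String × List String) a =>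
      if pyItem a "status" = "finalized" then (res.1 ++ [pyItem a "name"], res.2)
      else if pyItem a "status" = "not_finalized" then (res.1, res.2 ++ [pyItem a "name"])
      else res)
    ([], [])
  [("finalized", r.1), ("not_finalized", r.2)]

-- ===== PORT B =====
-- recursion on the list: build the tail's result, then PREPEND the head's name to the bucket
-- named by its status ('s in rest' = the status is one of the two keys)
def scGo (students : List (List (String × String))) : List String × List String :=
  match students with
  | [] => ([], [])
  | a :: tl =>
    let rest := scGo tl
    let s := pyItem a "status"
    if s = "finalized" then (pyItem a "name" :: rest.1, rest.2)
    else if s = "not_finalized" then (rest.1, pyItem a "name" :: rest.2)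
    else rest

def status_count_alt (students : List (List (String × String))) : List (String × List String) :=
  let r := scGo students
  [("finalized", r.1), ("not_finalized", r.2)]

-- ===== PRECONDITION & SPEC =====
-- Pre_ excludes exactly the inputs where both Pythons raise KeyError: a student without a
-- 'status' key, or one with a matching status but no 'name' key.
def Pre_status_count (students : List (List (String × String))) : Prop :=
  ∀ a ∈ students, (a.lookup "status").isSome ∧
    ((a.lookup "status" = some "finalized" ∨ a.lookup "status" = some "not_finalized") →
      (a.lookup "name").isSome)
instance (students : List (List (String × String))) : Decidable (Pre_status_count students) := by unfold Pre_status_count; infer_instance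
def pvWitness_status_count : (List (List (String × String))) :=
  [[("name", "Ana"), ("status", "finalized")], [("name", "Bo"), ("status", "not_finalized")], [("status", "dropped")]]

def Spec_status_count (students : List (List (String × String))) (out : List (String × List String)) : Prop := out = status_count_alt students
instance (students : List (List (String × String))) (out : List (String × List String)) : Decidable (Spec_status_count students out) := by unfold Spec_status_count; infer_instance

-- ===== CLAIM (what is proved, stated in full; the proofs are below) =====
def Claim_equal_status_count : Prop := ∀ (students : List (List (String × String))), Dom_status_count students → Pre_status_count students → Spec_status_count students (status_count students)

-- ===== LEMMAS AND PROOFS =====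
-- A's fold appends, from any accumulator, exactly what B's recursion builds by prepending
theorem status_count_fold (students : List (List (String × String))) (acc : List String × List String) :
    students.foldl
      (fun (res : List String × List String) a =>
        if pyItem a "status" = "finalized" then (res.1 ++ [pyItem a "name"], res.2)
        else if pyItem a "status" = "not_finalized" then (res.1, res.2 ++ [pyItem a "name"])
        else res) acc
    = (acc.1 ++ (scGo students).1, acc.2 ++ (scGo students).2) := by
  induction students generalizing acc with
  | nil => simp [scGo]
  | cons a rest ih =>
    simp only [List.foldl_cons, scGo]
    by_cases h1 : pyItem a "status" = "finalized"
    · have h2 : ¬ pyItem a "status" = "not_finalized" := by rw [h1]; decide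
      simp [h1, h2, ih]
    · by_cases h2 : pyItem a "status" = "not_finalized"
      · simp [h1, h2, ih]
      · simp [h1, h2, ih]

-- ===== VERDICT (by name: the statement is the Claim_ definition above) =====
theorem status_count_spec : Claim_equal_status_count := by
  intro students _ _
  unfold Spec_status_count status_count status_count_alt
  rw [status_count_fold]
  simp
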